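-- pv_equiv track=rewrite | github.com/timrozday/text_query | text_query/text_query.py | next_rev_conn_skip_stop_words
-- ===== SOURCE A (Python) =====
-- def next_rev_conn_skip_stop_words(sentence, rev_conn, start_id, stop_words):
--     next_ids = set()
--     if not start_id in rev_conn: return set()
--     for next_id in rev_conn[start_id]:
--         if next_id is None:
--             next_ids.add(next_id)
--             continue
--         if sentence['words'][next_id]['word'].lower() in stop_words:
--             next_ids.update(next_rev_conn_skip_stop_words(sentence, rev_conn, next_id, stop_words))
--         else: next_ids.add(next_id)
--     return next_ids
-- ===== SOURCE B (Python) =====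
-- def next_rev_conn_skip_stop_words(sentence, rev_conn, start_id, stop_words):
--     # Two-phase memoized expansion: per node, build the flat expansion
--     # SEQUENCE (a deduplicated list, cached in `memo`), then return it as a set.
--     # Each node's edge list is expanded at most once, instead of once per path.
--     if start_id not in rev_conn:
--         return set()
--     memo = {}
--
--     def seq(sid):
--         if sid in memo:
--             return memo[sid]
--         res = []
--         for nid in rev_conn.get(sid, []):
--             if nid is not None and sentence['words'][nid]['word'].lower() in stop_words:
--                 res.extend(seq(nid))
--             else:
--                 res.append(nid)
--         out = list(dict.fromkeys(res))  # first-occurrence dedup keeps sequences small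
--         memo[sid] = out
--         return out
--
--     return set(seq(start_id))
-- ===== Notes on version B (the rewrite author's own statement) =====
-- stated objective: alternative
-- what changed: A recursively recomputes a fresh result set for every visit of a stop-word node, re-expanding shared subgraphs once per path; B builds per-node flat deduplicated expansion sequences cached in a memo dict (each node's edge list expanded at most once) and converts the start node's sequence to a set at the end.
import Mathlib
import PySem

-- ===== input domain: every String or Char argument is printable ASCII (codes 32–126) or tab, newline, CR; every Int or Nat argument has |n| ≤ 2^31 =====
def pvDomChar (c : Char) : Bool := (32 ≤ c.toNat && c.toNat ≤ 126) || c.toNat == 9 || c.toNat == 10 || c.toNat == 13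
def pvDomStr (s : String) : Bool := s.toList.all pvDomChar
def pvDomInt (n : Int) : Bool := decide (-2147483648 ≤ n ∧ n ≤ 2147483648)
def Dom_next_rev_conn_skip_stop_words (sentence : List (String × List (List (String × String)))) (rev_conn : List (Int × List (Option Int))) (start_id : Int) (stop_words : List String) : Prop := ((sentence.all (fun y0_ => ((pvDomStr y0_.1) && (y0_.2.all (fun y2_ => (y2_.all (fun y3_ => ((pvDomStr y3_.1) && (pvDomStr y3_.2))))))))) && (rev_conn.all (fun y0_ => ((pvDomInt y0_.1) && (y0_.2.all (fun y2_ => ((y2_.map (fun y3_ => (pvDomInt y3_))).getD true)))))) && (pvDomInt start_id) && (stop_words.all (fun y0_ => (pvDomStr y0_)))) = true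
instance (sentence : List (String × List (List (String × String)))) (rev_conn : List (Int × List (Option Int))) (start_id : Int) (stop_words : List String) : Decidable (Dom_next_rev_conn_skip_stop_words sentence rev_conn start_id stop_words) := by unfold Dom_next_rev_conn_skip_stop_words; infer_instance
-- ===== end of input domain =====

-- B replaces A's recursion (which recomputes a fresh result set on every visit of a
-- stop-word node, re-expanding shared subgraphs once per path) by a two-phase memoized
-- expansion: per node it builds a flat deduplicated expansion SEQUENCE, cached in a
-- memo dict so each node's edge list is expanded at most once, and converts the start
-- node's sequence to a set at the end.

-- ===== PORT A =====
-- sentence['words'][j]['word'].lower() in stop_words; none = the lookup raises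
-- (KeyError 'words' / IndexError / KeyError 'word'), exactly Python's evaluation order.
def pvStop? (sentence : List (String × List (List (String × String)))) (stop_words : List String) (j : Int) : Option Bool :=
  match List.lookup "words" sentence with
  | none => none
  | some ws =>
    match PySem.List.pyGet? ws j with
    | none => none
    | some d =>
      match List.lookup "word" d with
      | none => none
      | some w => some (stop_words.contains (PySem.Str.lower w))

mutual
-- fuel-guarded literal recursion of A (Python A recurses unboundedly; a fuel of
-- two more than the length of rev_conn is proved sufficient on Pre_, see pv_SUF below)
def pvGoA (sentence : List (String × List (List (String × String)))) (rev_conn : List (Int × List (Option Int))) (stop_words : List String) : Nat → Int → Option (List (Option Int))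
  | 0, _ => none
  | f+1, sid =>
    match List.lookup sid rev_conn with
    | none => some []                       -- if not start_id in rev_conn: return set()
    | some ids => pvGoAList sentence rev_conn stop_words f ids []
termination_by f _ => (f, 0)
-- the 'for next_id in rev_conn[start_id]' loop, acc = next_ids
def pvGoAList (sentence : List (String × List (List (String × String)))) (rev_conn : List (Int × List (Option Int))) (stop_words : List String) : Nat → List (Option Int) → List (Option Int) → Option (List (Option Int))
  | _, [], acc => some acc
  | f, none :: xs, acc => pvGoAList sentence rev_conn stop_words f xs (PySem.Set.add acc none)
  | f, some j :: xs, acc =>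
    match pvStop? sentence stop_words j with
    | none => none
    | some true =>
      match pvGoA sentence rev_conn stop_words f j with
      | none => none
      | some s => pvGoAList sentence rev_conn stop_words f xs (s.foldl PySem.Set.add acc)
    | some false => pvGoAList sentence rev_conn stop_words f xs (PySem.Set.add acc (some j))
termination_by f ids _ => (f, ids.length + 1)
end

def next_rev_conn_skip_stop_words (sentence : List (String × List (List (String × String)))) (rev_conn : List (Int × List (Option Int))) (start_id : Int) (stop_words : List String) : List (Option Int) :=
  (pvGoA sentence rev_conn stop_words (rev_conn.length + 2) start_id).getD []

-- ===== PORT B =====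
mutual
-- one iteration of B's 'for nid in rev_conn.get(sid, [])' loop body: the running
-- state is none once the Python would have raised, else (memo, res)
def pvStepB (snt : List (String × List (List (String × String)))) (cns : List (Int × List (Option Int))) (swd : List String) : Nat → Option (PySem.Dict Int (List (Option Int)) × List (Option Int)) → Option Int → Option (PySem.Dict Int (List (Option Int)) × List (Option Int))
  | _, none, _ => none
  | _, some (mm, res), none => some (mm, res ++ [none])
  | g, some (mm, res), some j =>
    match pvStop? snt swd j with
    | none => none
    | some true =>
      match pvSeqB snt cns swd g j mm with
      | none => none
      | some (m2, sj) => some (m2, res ++ sj)                   -- res.extend(seq(nid))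
    | some false => some (mm, res ++ [some j])                  -- res.append(nid)
termination_by g _ _ => (g, 1)
-- B's seq(sid): the memo caches each node's deduplicated flat expansion sequence,
-- so a node is expanded at most once
def pvSeqB (snt : List (String × List (List (String × String)))) (cns : List (Int × List (Option Int))) (swd : List String) : Nat → Int → PySem.Dict Int (List (Option Int)) → Option (PySem.Dict Int (List (Option Int)) × List (Option Int))
  | 0, _, _ => none
  | g+1, sid, memo =>
    match PySem.Dict.get? memo sid with
    | some cached => some (memo, cached)                        -- if sid in memo: return memo[sid]
    | none =>
      match ((List.lookup sid cns).getD []).foldl (fun st nid => pvStepB snt cns swd g st nid) (some (memo, [])) with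
      | none => none
      | some (m1, res) =>
        let out := PySem.Set.ofList res                         -- list(dict.fromkeys(res))
        some (PySem.Dict.insert m1 sid out, out)                -- memo[sid] = out; return out
termination_by g _ _ => (g, 0)
end

def next_rev_conn_skip_stop_words_alt (sentence : List (String × List (List (String × String)))) (rev_conn : List (Int × List (Option Int))) (start_id : Int) (stop_words : List String) : List (Option Int) :=
  match List.lookup start_id rev_conn with
  | none => []
  | some _ =>
    match pvSeqB sentence rev_conn stop_words (rev_conn.length + 2) start_id PySem.Dict.empty with
    | none => []
    | some (_, sq) => PySem.Set.ofList sq                        -- return set(seq(start_id))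

-- ===== PRECONDITION & SPEC =====
-- stop-word successors of a node: the edges A recurses through
def pvSuccs (sentence : List (String × List (List (String × String)))) (rev_conn : List (Int × List (Option Int))) (stop_words : List String) (k : Int) : List Int :=
  match List.lookup k rev_conn with
  | none => []
  | some ids => ids.filterMap (fun o =>
      match o with
      | none => none
      | some j =>
        match pvStop? sentence stop_words j with
        | some true => some j
        | _ => none)

-- node k's own edges never raise (every non-None edge's word lookup succeeds)
def pvOkNode (sentence : List (String × List (List (String × String)))) (rev_conn : List (Int × List (Option Int))) (stop_words : List String) (k : Int) : Bool :=
  match List.lookup k rev_conn with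
  | none => true
  | some ids => ids.all (fun o =>
      match o with
      | none => true
      | some j => (pvStop? sentence stop_words j).isSome)

-- the stop-word-successor paths from sid with at most n edges: a closed-form property
-- of the input graph (plain path enumeration over pvSuccs; it computes no result sets
-- and is independent of either port's algorithm)
def pvPaths (sentence : List (String × List (List (String × String)))) (rev_conn : List (Int × List (Option Int))) (stop_words : List String) : Nat → Int → List (List Int)
  | Nat.zero, sid => [[sid]]
  | Nat.succ n, sid => [sid] :: (pvSuccs sentence rev_conn stop_words sid).flatMap (fun j => (pvPaths sentence rev_conn stop_words n j).map (sid :: ·))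

-- Pre_ excludes exactly the inputs where Python A raises: a repeated node on some
-- stop-word path from start_id (infinite recursion → RecursionError) or a reachable
-- edge whose word lookup raises (KeyError/IndexError); on every other input A returns.
def Pre_next_rev_conn_skip_stop_words (sentence : List (String × List (List (String × String)))) (rev_conn : List (Int × List (Option Int))) (start_id : Int) (stop_words : List String) : Prop :=
  ∀ p ∈ pvPaths sentence rev_conn stop_words rev_conn.length.succ start_id,
    p.Nodup ∧ ∀ k ∈ p, pvOkNode sentence rev_conn stop_words k = true
instance (sentence : List (String × List (List (String × String)))) (rev_conn : List (Int × List (Option Int))) (start_id : Int) (stop_words : List String) : Decidable (Pre_next_rev_conn_skip_stop_words sentence rev_conn start_id stop_words) := by unfold Pre_next_rev_conn_skip_stop_words; infer_instance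

def pvWitness_next_rev_conn_skip_stop_words : (List (String × List (List (String × String)))) × (List (Int × List (Option Int))) × Int × List String :=
  ([("words", [[("word", "the")], [("word", "dog")]])], [(1, [some 0, none]), (0, [none])], 1, ["the"])

def Spec_next_rev_conn_skip_stop_words (sentence : List (String × List (List (String × String)))) (rev_conn : List (Int × List (Option Int))) (start_id : Int) (stop_words : List String) (out : List (Option Int)) : Prop := out = next_rev_conn_skip_stop_words_alt sentence rev_conn start_id stop_words
instance (sentence : List (String × List (List (String × String)))) (rev_conn : List (Int × List (Option Int))) (start_id : Int) (stop_words : List String) (out : List (Option Int)) : Decidable (Spec_next_rev_conn_skip_stop_words sentence rev_conn start_id stop_words out) := by unfold Spec_next_rev_conn_skip_stop_words; infer_instance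

-- ===== CLAIM (what is proved, stated in full; the proofs are below) =====
def Claim_equal_next_rev_conn_skip_stop_words : Prop := ∀ (sentence : List (String × List (List (String × String)))) (rev_conn : List (Int × List (Option Int))) (start_id : Int) (stop_words : List String), Dom_next_rev_conn_skip_stop_words sentence rev_conn start_id stop_words → Pre_next_rev_conn_skip_stop_words sentence rev_conn start_id stop_words → Spec_next_rev_conn_skip_stop_words sentence rev_conn start_id stop_words (next_rev_conn_skip_stop_words sentence rev_conn start_id stop_words)

-- ===== LEMMAS AND PROOFS =====

theorem pvWitness_ok : Dom_next_rev_conn_skip_stop_words (pvWitness_next_rev_conn_skip_stop_words.1) (pvWitness_next_rev_conn_skip_stop_words.2.1) (pvWitness_next_rev_conn_skip_stop_words.2.2.1) (pvWitness_next_rev_conn_skip_stop_words.2.2.2) ∧ Pre_next_rev_conn_skip_stop_words (pvWitness_next_rev_conn_skip_stop_words.1) (pvWitness_next_rev_conn_skip_stop_words.2.1) (pvWitness_next_rev_conn_skip_stop_words.2.2.1) (pvWitness_next_rev_conn_skip_stop_words.2.2.2) := by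
  constructor <;> decide

-- ---- Python-set algebra: foldl Set.add adds the elements of l into the set acc, in order ----

theorem pv_add_of_mem {x : Option Int} {s : List (Option Int)} (h : x ∈ s) :
    PySem.Set.add s x = s := by
  simp [PySem.Set.add, PySem.Set.contains, h]

theorem pv_add_of_not_mem {x : Option Int} {s : List (Option Int)} (h : x ∉ s) :
    PySem.Set.add s x = s ++ [x] := by
  simp [PySem.Set.add, PySem.Set.contains, h]

theorem pv_mem_U_left (x : Option Int) (l : List (Option Int)) :
    ∀ s : List (Option Int), x ∈ s → x ∈ l.foldl PySem.Set.add s := by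
  induction l with
  | nil => exact fun s h => h
  | cons a t ih =>
    intro s h
    exact ih _ ((PySem.Set.mem_add s a x).mpr (Or.inl h))

theorem pv_mem_U_right (x : Option Int) (l : List (Option Int)) :
    ∀ s : List (Option Int), x ∈ l → x ∈ l.foldl PySem.Set.add s := by
  induction l with
  | nil => intro s h; cases h
  | cons a t ih =>
    intro s h
    rcases List.mem_cons.mp h with rfl | hx
    · exact pv_mem_U_left x t _ ((PySem.Set.mem_add s x x).mpr (Or.inr rfl))
    · exact ih _ hx

theorem pv_U_add (acc s : List (Option Int)) (x : Option Int) :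
    List.foldl PySem.Set.add acc (PySem.Set.add s x)
      = PySem.Set.add (List.foldl PySem.Set.add acc s) x := by
  by_cases h : x ∈ s
  · rw [pv_add_of_mem h, pv_add_of_mem (pv_mem_U_right x s acc h)]
  · rw [pv_add_of_not_mem h, List.foldl_append]
    rfl

theorem pv_U_act (l : List (Option Int)) :
    ∀ s acc : List (Option Int),
    List.foldl PySem.Set.add acc (List.foldl PySem.Set.add s l)
      = List.foldl PySem.Set.add (List.foldl PySem.Set.add acc s) l := by
  induction l with
  | nil => intro s acc; rfl
  | cons x xs ih =>
    intro s acc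
    show List.foldl PySem.Set.add acc (List.foldl PySem.Set.add (PySem.Set.add s x) xs) = _
    rw [ih (PySem.Set.add s x) acc, pv_U_add]
    rfl

-- dedup idempotence: folding a deduplicated sequence adds the same elements
theorem pv_U_dedup (s acc : List (Option Int)) :
    List.foldl PySem.Set.add acc (List.foldl PySem.Set.add [] s)
      = List.foldl PySem.Set.add acc s := by
  rw [pv_U_act s [] acc]
  rfl

-- ---- lookup / keys ----

theorem pv_lookup_mem_keys {l : List (Int × List (Option Int))} {k : Int}
    (h : (List.lookup k l).isSome) : k ∈ l.map Prod.fst := by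
  induction l with
  | nil => simp [List.lookup] at h
  | cons a t ih =>
    rw [List.map_cons]
    by_cases hk : k = a.1
    · simp [hk]
    · have hb : (k == a.1) = false := beq_eq_false_iff_ne.mpr hk
      rw [List.lookup, hb] at h
      exact List.mem_cons_of_mem _ (ih h)

-- ---- fuel monotonicity of A ----

theorem pv_monoA (se : List (String × List (List (String × String)))) (rc : List (Int × List (Option Int))) (sw : List String) :
    ∀ f : Nat,
      (∀ sid S, pvGoA se rc sw f sid = some S → pvGoA se rc sw (f+1) sid = some S) ∧
      (∀ ids acc S, pvGoAList se rc sw f ids acc = some S → pvGoAList se rc sw (f+1) ids acc = some S) := by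
  intro f
  induction f with
  | zero =>
    have hnode : ∀ sid S, pvGoA se rc sw 0 sid = some S → pvGoA se rc sw 1 sid = some S := by
      intro sid S h; simp [pvGoA] at h
    refine ⟨hnode, ?_⟩
    intro ids
    induction ids with
    | nil => intro acc S h; simp only [pvGoAList] at h ⊢; exact h
    | cons e xs ih =>
      intro acc S h
      cases e with
      | none => simp only [pvGoAList] at h ⊢; exact ih _ _ h
      | some j =>
        simp only [pvGoAList] at h ⊢
        cases hst : pvStop? se sw j with
        | none => rw [hst] at h; simp at h
        | some b =>
          cases b with
          | false =>
            rw [hst] at h; dsimp only at h ⊢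
            exact ih _ _ h
          | true =>
            rw [hst] at h; dsimp only at h ⊢
            cases hA : pvGoA se rc sw 0 j with
            | none => rw [hA] at h; simp at h
            | some Sj =>
              rw [hA] at h; dsimp only at h
              rw [hnode j Sj hA]; dsimp only
              exact ih _ _ h
  | succ f ihf =>
    have hnode : ∀ sid S, pvGoA se rc sw (f+1) sid = some S → pvGoA se rc sw (f+2) sid = some S := by
      intro sid S h
      simp only [pvGoA] at h ⊢
      cases hl : List.lookup sid rc with
      | none => rw [hl] at h; dsimp only at h ⊢; exact h
      | some ids => rw [hl] at h; dsimp only at h ⊢; exact ihf.2 ids [] S h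
    refine ⟨hnode, ?_⟩
    intro ids
    induction ids with
    | nil => intro acc S h; simp only [pvGoAList] at h ⊢; exact h
    | cons e xs ih =>
      intro acc S h
      cases e with
      | none => simp only [pvGoAList] at h ⊢; exact ih _ _ h
      | some j =>
        simp only [pvGoAList] at h ⊢
        cases hst : pvStop? se sw j with
        | none => rw [hst] at h; simp at h
        | some b =>
          cases b with
          | false =>
            rw [hst] at h; dsimp only at h ⊢
            exact ih _ _ h
          | true =>
            rw [hst] at h; dsimp only at h ⊢
            cases hA : pvGoA se rc sw (f+1) j with
            | none => rw [hA] at h; simp at h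
            | some Sj =>
              rw [hA] at h; dsimp only at h
              rw [hnode j Sj hA]; dsimp only
              exact ih _ _ h

theorem pv_monoA_le (se : List (String × List (List (String × String)))) (rc : List (Int × List (Option Int))) (sw : List String)
    {f g : Nat} (hfg : f ≤ g) {sid : Int} {S : List (Option Int)}
    (h : pvGoA se rc sw f sid = some S) : pvGoA se rc sw g sid = some S := by
  induction g with
  | zero => cases Nat.le_zero.mp hfg; exact h
  | succ g ih =>
    rcases Nat.lt_or_ge f (g+1) with hlt | hge
    · exact (pv_monoA se rc sw g).1 sid S (ih (Nat.lt_succ_iff.mp hlt))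
    · have hfe : f = g + 1 := Nat.le_antisymm hfg hge
      rw [hfe] at h; exact h

-- ---- the memo invariant: every cached sequence dedups to its node's A-result ----

def pvGood (se : List (String × List (List (String × String)))) (rc : List (Int × List (Option Int))) (sw : List String) (F : Nat) (m : PySem.Dict Int (List (Option Int))) : Prop :=
  ∀ p ∈ m.items, ∃ Sv, pvGoA se rc sw F p.1 = some Sv ∧ List.foldl PySem.Set.add [] p.2 = Sv

theorem pv_good_insert {se : List (String × List (List (String × String)))} {rc : List (Int × List (Option Int))} {sw : List String} {F : Nat} {m : PySem.Dict Int (List (Option Int))} {k : Int} {s Sv : List (Option Int)}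
    (hm : pvGood se rc sw F m) (hA : pvGoA se rc sw F k = some Sv) (hs : List.foldl PySem.Set.add [] s = Sv) :
    pvGood se rc sw F (PySem.Dict.insert m k s) := by
  intro p hp
  rcases (PySem.Dict.mem_items_insert _ _ _ _).mp hp with rfl | ⟨hmem, _⟩
  · exact ⟨Sv, hA, hs⟩
  · exact hm p hmem

-- ---- main simulation: B's memoized sequence dedups to A's result set ----
-- scan level: A's loop from acc = foldl add [] res mirrors B's foldl of pvStepB

theorem pv_SIM_scan (se : List (String × List (List (String × String)))) (rc : List (Int × List (Option Int))) (sw : List String) (F f : Nat)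
    (hnode : ∀ sid m S, f ≤ F → pvGood se rc sw F m → pvGoA se rc sw f sid = some S →
      ∃ m' s, pvSeqB se rc sw f sid m = some (m', s) ∧ pvGood se rc sw F m' ∧ List.foldl PySem.Set.add [] s = S)
    (hfF : f + 1 ≤ F) :
    ∀ (ids : List (Option Int)) (m : PySem.Dict Int (List (Option Int))) (res C : List (Option Int)),
      pvGood se rc sw F m → pvGoAList se rc sw f ids (List.foldl PySem.Set.add [] res) = some C →
      ∃ m' res', ids.foldl (fun st nid => pvStepB se rc sw f st nid) (some (m, res)) = some (m', res') ∧ pvGood se rc sw F m' ∧ List.foldl PySem.Set.add [] res' = C := by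
  intro ids
  induction ids with
  | nil =>
    intro m res C hm h
    simp only [pvGoAList] at h
    injection h with h
    exact ⟨m, res, by simp only [List.foldl_nil], hm, h⟩
  | cons e xs ih =>
    intro m res C hm h
    cases e with
    | none =>
      simp only [pvGoAList] at h
      have hres : List.foldl PySem.Set.add [] (res ++ [none])
          = PySem.Set.add (List.foldl PySem.Set.add [] res) none := by
        rw [List.foldl_append]; rfl
      rw [← hres] at h
      obtain ⟨m', res', hB, hm', hC⟩ := ih m (res ++ [none]) C hm h
      refine ⟨m', res', ?_, hm', hC⟩
      rw [List.foldl_cons]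
      have hstep : pvStepB se rc sw f (some (m, res)) none = some (m, res ++ [none]) := by
        simp [pvStepB]
      rw [hstep]
      exact hB
    | some j =>
      simp only [pvGoAList] at h
      cases hst : pvStop? se sw j with
      | none => rw [hst] at h; simp at h
      | some b =>
        cases b with
        | false =>
          rw [hst] at h; dsimp only at h
          have hres : List.foldl PySem.Set.add [] (res ++ [some j])
              = PySem.Set.add (List.foldl PySem.Set.add [] res) (some j) := by
            rw [List.foldl_append]; rfl
          rw [← hres] at h
          obtain ⟨m', res', hB, hm', hC⟩ := ih m (res ++ [some j]) C hm h
          refine ⟨m', res', ?_, hm', hC⟩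
          rw [List.foldl_cons]
          have hstep : pvStepB se rc sw f (some (m, res)) (some j) = some (m, res ++ [some j]) := by
            simp [pvStepB, hst]
          rw [hstep]
          exact hB
        | true =>
          rw [hst] at h; dsimp only at h
          cases hA : pvGoA se rc sw f j with
          | none => rw [hA] at h; simp at h
          | some Sj =>
            rw [hA] at h; dsimp only at h
            obtain ⟨m1, sq, hBj, hm1, hs⟩ := hnode j m Sj (Nat.le_of_succ_le hfF) hm hA
            have hres : List.foldl PySem.Set.add [] (res ++ sq)
                = List.foldl PySem.Set.add (List.foldl PySem.Set.add [] res) Sj := by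
              rw [List.foldl_append, ← hs, pv_U_act]
              rfl
            rw [← hres] at h
            obtain ⟨m', res', hB, hm', hC⟩ := ih m1 (res ++ sq) C hm1 h
            refine ⟨m', res', ?_, hm', hC⟩
            rw [List.foldl_cons]
            have hstep : pvStepB se rc sw f (some (m, res)) (some j) = some (m1, res ++ sq) := by
              simp [pvStepB, hst, hBj]
            rw [hstep]
            exact hB

theorem pv_SIM_node (se : List (String × List (List (String × String)))) (rc : List (Int × List (Option Int))) (sw : List String) (F : Nat) :
    ∀ f : Nat, ∀ sid m S, f ≤ F → pvGood se rc sw F m → pvGoA se rc sw f sid = some S →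
      ∃ m' s, pvSeqB se rc sw f sid m = some (m', s) ∧ pvGood se rc sw F m' ∧ List.foldl PySem.Set.add [] s = S := by
  intro f
  induction f with
  | zero => intro sid m S _ _ h; simp [pvGoA] at h
  | succ f ihf =>
    intro sid m S hF hm h
    cases hget : PySem.Dict.get? m sid with
    | some cached =>
      obtain ⟨Sv, hAF, hs⟩ := hm (sid, cached) (PySem.Dict.mem_items_of_get?_eq_some m hget)
      have hAF' : pvGoA se rc sw F sid = some S := pv_monoA_le se rc sw hF h
      have hSv : Sv = S := by rw [hAF] at hAF'; injection hAF'
      refine ⟨m, cached, ?_, hm, hSv ▸ hs⟩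
      simp only [pvSeqB]
      rw [hget]
    | none =>
      simp only [pvGoA] at h
      cases hl : List.lookup sid rc with
      | none =>
        rw [hl] at h; dsimp only at h
        injection h with h; subst h
        refine ⟨PySem.Dict.insert m sid [], [], ?_, ?_, rfl⟩
        · simp only [pvSeqB]
          rw [hget, hl]
          dsimp only [Option.getD_none, List.foldl_nil]
          rfl
        · refine pv_good_insert hm (pv_monoA_le se rc sw hF ?_) rfl
          simp only [pvGoA]
          rw [hl]
          rfl
      | some ids =>
        rw [hl] at h; dsimp only at h
        have h0 : List.foldl PySem.Set.add [] ([] : List (Option Int)) = [] := rfl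
        obtain ⟨m1, res, hB, hm1, hres⟩ := pv_SIM_scan se rc sw F f ihf hF ids m [] S hm (h0 ▸ h)
        have hdedup : List.foldl PySem.Set.add [] (PySem.Set.ofList res) = S := by
          rw [PySem.Set.ofList_eq_foldl, pv_U_dedup, hres]
        have hAF : pvGoA se rc sw F sid = some S := by
          refine pv_monoA_le se rc sw hF ?_
          simp only [pvGoA]
          rw [hl]; dsimp only
          exact h
        refine ⟨PySem.Dict.insert m1 sid (PySem.Set.ofList res), PySem.Set.ofList res, ?_, ?_, hdedup⟩
        · simp only [pvSeqB]
          rw [hget, hl]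
          simp only [Option.getD_some]
          rw [hB]
        · exact pv_good_insert hm1 hAF hdedup

-- ---- paths: shape, embedding, lengths ----

theorem pv_paths_head (se : List (String × List (List (String × String)))) (rc : List (Int × List (Option Int))) (sw : List String) (n : Nat) (sid : Int) :
    [sid] ∈ pvPaths se rc sw n sid := by
  cases n with
  | zero => simp [pvPaths]
  | succ n => simp [pvPaths]

theorem pv_paths_cons (se : List (String × List (List (String × String)))) (rc : List (Int × List (Option Int))) (sw : List String) {n : Nat} {src j : Int} {p : List Int}
    (hj : j ∈ pvSuccs se rc sw src) (hp : p ∈ pvPaths se rc sw n j) :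
    src :: p ∈ pvPaths se rc sw (n+1) src := by
  simp only [pvPaths]
  exact List.mem_cons.mpr (Or.inr (List.mem_flatMap.mpr ⟨j, hj, List.mem_map.mpr ⟨p, hp, rfl⟩⟩))

theorem pv_succs_key (se : List (String × List (List (String × String)))) (rc : List (Int × List (Option Int))) (sw : List String) {sid j : Int}
    (h : j ∈ pvSuccs se rc sw sid) : (List.lookup sid rc).isSome := by
  unfold pvSuccs at h
  cases hl : List.lookup sid rc with
  | none => rw [hl] at h; simp at h
  | some ids => simp

theorem pv_mem_succs (se : List (String × List (List (String × String)))) (rc : List (Int × List (Option Int))) (sw : List String) {sid j : Int} {ids : List (Option Int)}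
    (hl : List.lookup sid rc = some ids) (hmem : some j ∈ ids) (hst : pvStop? se sw j = some true) :
    j ∈ pvSuccs se rc sw sid := by
  unfold pvSuccs
  rw [hl]
  exact List.mem_filterMap.mpr ⟨some j, hmem, by simp [hst]⟩

theorem pv_ok_elim (se : List (String × List (List (String × String)))) (rc : List (Int × List (Option Int))) (sw : List String) {sid j : Int} {ids : List (Option Int)}
    (hok : pvOkNode se rc sw sid = true) (hl : List.lookup sid rc = some ids) (hmem : some j ∈ ids) :
    (pvStop? se sw j).isSome := by
  unfold pvOkNode at hok
  rw [hl] at hok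
  have := List.all_eq_true.mp hok (some j) hmem
  simpa using this

theorem pv_paths_shape (se : List (String × List (List (String × String)))) (rc : List (Int × List (Option Int))) (sw : List String) :
    ∀ (n : Nat) (sid : Int) (p : List Int), p ∈ pvPaths se rc sw n sid →
      ∃ q, p = sid :: q ∧ ∀ k ∈ p.dropLast, (List.lookup k rc).isSome := by
  intro n
  induction n with
  | zero =>
    intro sid p hp
    simp [pvPaths] at hp
    exact ⟨[], hp, by simp [hp]⟩
  | succ n ih =>
    intro sid p hp
    simp only [pvPaths] at hp
    rcases List.mem_cons.mp hp with rfl | hp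
    · exact ⟨[], rfl, by simp⟩
    · obtain ⟨j, hj, hq⟩ := List.mem_flatMap.mp hp
      obtain ⟨q, hqmem, rfl⟩ := List.mem_map.mp hq
      obtain ⟨q', rfl, hkeys⟩ := ih j q hqmem
      refine ⟨j :: q', rfl, ?_⟩
      intro k hk
      rw [List.dropLast_cons₂] at hk
      rcases List.mem_cons.mp hk with rfl | hk
      · exact pv_succs_key se rc sw hj
      · exact hkeys k hk

theorem pv_nodup_sub_len {l m : List Int} (h : l.Nodup) (hs : l ⊆ m) : l.length ≤ m.length := by
  calc l.length = l.toFinset.card := (List.toFinset_card_of_nodup h).symm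
    _ ≤ m.toFinset.card := Finset.card_le_card (by intro x hx; simp at hx ⊢; exact hs hx)
    _ ≤ m.length := List.toFinset_card_le m

theorem pv_len (se : List (String × List (List (String × String)))) (rc : List (Int × List (Option Int))) (sw : List String) (start_id : Int)
    (hpre : Pre_next_rev_conn_skip_stop_words se rc start_id sw) :
    ∀ p ∈ pvPaths se rc sw (rc.length + 1) start_id, p.length ≤ rc.length + 1 := by
  intro p hp
  obtain ⟨hnd, _⟩ := hpre p hp
  obtain ⟨q, rfl, hkeys⟩ := pv_paths_shape se rc sw (rc.length + 1) start_id _ hp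
  have h1 : (start_id :: q).dropLast.Nodup := hnd.sublist (List.dropLast_sublist (start_id :: q))
  have h2 : (start_id :: q).dropLast ⊆ rc.map Prod.fst := fun k hk => pv_lookup_mem_keys (hkeys k hk)
  have h3 : (start_id :: q).dropLast.length ≤ (rc.map Prod.fst).length := pv_nodup_sub_len h1 h2
  rw [List.length_map] at h3
  have h4 : (start_id :: q).dropLast.length = (start_id :: q).length - 1 := List.length_dropLast
  have h5 : (start_id :: q).length = q.length + 1 := by simp
  omega

-- ---- sufficiency: on Pre_ inputs, fuel rev_conn.length + 2 never runs out for A ----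

theorem pv_SUF (se : List (String × List (List (String × String)))) (rc : List (Int × List (Option Int))) (sw : List String) :
    ∀ (f : Nat) (sid : Int),
      (∀ p ∈ pvPaths se rc sw f sid, ∀ k ∈ p, pvOkNode se rc sw k = true) →
      (∀ p ∈ pvPaths se rc sw f sid, p.length ≤ f) →
      ∃ S, pvGoA se rc sw (f+1) sid = some S := by
  intro f
  induction f with
  | zero =>
    intro sid _ h2
    have := h2 [sid] (pv_paths_head se rc sw 0 sid)
    simp at this
  | succ f ihf =>
    intro sid h1 h2
    cases hl : List.lookup sid rc with
    | none =>
      refine ⟨[], ?_⟩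
      simp only [pvGoA]
      rw [hl]
    | some ids =>
      have hok : pvOkNode se rc sw sid = true :=
        h1 [sid] (pv_paths_head se rc sw (f+1) sid) sid (by simp)
      have hlist : ∀ ids' : List (Option Int), (∀ o ∈ ids', o ∈ ids) →
          ∀ acc, ∃ S, pvGoAList se rc sw (f+1) ids' acc = some S := by
        intro ids'
        induction ids' with
        | nil => intro _ acc; exact ⟨acc, by simp [pvGoAList]⟩
        | cons e xs ih =>
          intro hsub acc
          cases e with
          | none =>
            obtain ⟨S, hS⟩ := ih (fun o ho => hsub o (by simp [ho])) (PySem.Set.add acc none)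
            exact ⟨S, by simp only [pvGoAList]; exact hS⟩
          | some j =>
            have hstS : (pvStop? se sw j).isSome :=
              pv_ok_elim se rc sw hok hl (hsub (some j) (by simp))
            cases hst : pvStop? se sw j with
            | none => rw [hst] at hstS; simp at hstS
            | some b =>
              cases b with
              | false =>
                obtain ⟨S, hS⟩ := ih (fun o ho => hsub o (by simp [ho])) (PySem.Set.add acc (some j))
                refine ⟨S, ?_⟩
                simp only [pvGoAList]
                rw [hst]; dsimp only
                exact hS
              | true =>
                have hjs : j ∈ pvSuccs se rc sw sid := pv_mem_succs se rc sw hl (hsub (some j) (by simp)) hst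
                have hA : ∃ Sj, pvGoA se rc sw (f+1) j = some Sj := by
                  apply ihf j
                  · intro p hp k hk
                    exact h1 (sid :: p) (pv_paths_cons se rc sw hjs hp) k (by simp [hk])
                  · intro p hp
                    have := h2 (sid :: p) (pv_paths_cons se rc sw hjs hp)
                    simp at this
                    omega
                obtain ⟨Sj, hSj⟩ := hA
                obtain ⟨S, hS⟩ := ih (fun o ho => hsub o (by simp [ho])) (List.foldl PySem.Set.add acc Sj)
                refine ⟨S, ?_⟩
                simp only [pvGoAList]
                rw [hst]; dsimp only
                rw [hSj]; dsimp only
                exact hS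
      obtain ⟨S, hS⟩ := hlist ids (fun o ho => ho) []
      refine ⟨S, ?_⟩
      simp only [pvGoA]
      rw [hl]; dsimp only
      exact hS

-- ===== VERDICT (by name: the statement is the Claim_ definition above) =====
theorem next_rev_conn_skip_stop_words_spec : Claim_equal_next_rev_conn_skip_stop_words := by
  intro se rc start_id sw _hdom hpre
  unfold Spec_next_rev_conn_skip_stop_words
  unfold next_rev_conn_skip_stop_words next_rev_conn_skip_stop_words_alt
  cases hl : List.lookup start_id rc with
  | none =>
    have hA : pvGoA se rc sw (rc.length + 2) start_id = some [] := by
      have h2 : rc.length + 2 = (rc.length + 1) + 1 := rfl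
      rw [h2]
      simp only [pvGoA]
      rw [hl]
    rw [hA]
    rfl
  | some ids =>
    have hS : ∃ S, pvGoA se rc sw ((rc.length + 1) + 1) start_id = some S := by
      apply pv_SUF se rc sw (rc.length + 1) start_id
      · exact fun p hp => (hpre p hp).2
      · exact pv_len se rc sw start_id hpre
    obtain ⟨S, hS⟩ := hS
    have hS' : pvGoA se rc sw (rc.length + 2) start_id = some S := hS
    have hgood0 : pvGood se rc sw (rc.length + 2) PySem.Dict.empty := by
      intro p hp; simp [PySem.Dict.empty] at hp
    obtain ⟨m', s, hB, _, hs⟩ := pv_SIM_node se rc sw (rc.length + 2) (rc.length + 2) start_id PySem.Dict.empty S le_rfl hgood0 hS'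
    rw [hS', hB]
    dsimp only [Option.getD]
    rw [PySem.Set.ofList_eq_foldl]
    exact hs.symm
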